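-- pv_equiv track=rewrite | github.com/Dallasregenerative/emergent.peptide | backend/drug_interaction_service.py | _generate_interaction_summary
-- ===== SOURCE A (Python) =====
-- from typing import List, Dict, Optional, Tuple
-- from enum import Enum
--
-- class InteractionSeverity(str, Enum):
--     MINOR = "minor"
--     MODERATE = "moderate"
--     MAJOR = "major"
--     CONTRAINDICATED = "contraindicated"
--
-- def _generate_interaction_summary(interactions: List[Dict]) -> str:
--     """Generate a summary of interactions found"""
--     if not interactions:
--         return "No significant drug interactions found."
--
--     major_count = len([i for i in interactions if i["severity"] in [InteractionSeverity.MAJOR, InteractionSeverity.CONTRAINDICATED]])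
--     moderate_count = len([i for i in interactions if i["severity"] == InteractionSeverity.MODERATE])
--     minor_count = len([i for i in interactions if i["severity"] == InteractionSeverity.MINOR])
--
--     summary_parts = []
--     if major_count > 0:
--         summary_parts.append(f"{major_count} major interaction(s)")
--     if moderate_count > 0:
--         summary_parts.append(f"{moderate_count} moderate interaction(s)")
--     if minor_count > 0:
--         summary_parts.append(f"{minor_count} minor interaction(s)")
--
--     return f"Found {', '.join(summary_parts)}. Review all interactions before prescribing."
-- ===== SOURCE B (Python) =====
-- from typing import List, Dict
--
-- def _generate_interaction_summary(interactions: List[Dict]) -> str: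
--     """Generate a summary of interactions found (single-pass, three counters)."""
--     if not interactions:
--         return "No significant drug interactions found."
--
--     major = moderate = minor = 0
--     for i in interactions:
--         s = i["severity"]
--         if s == "major" or s == "contraindicated":
--             major += 1
--         elif s == "moderate":
--             moderate += 1
--         elif s == "minor":
--             minor += 1
--
--     parts = [f"{c} {label} interaction(s)"
--              for c, label in ((major, "major"), (moderate, "moderate"), (minor, "minor"))
--              if c > 0]
--     return f"Found {', '.join(parts)}. Review all interactions before prescribing."
-- ===== Notes on version B (the rewrite author's own statement) =====
-- stated objective: alternative
-- what changed: Replaces A's three separate filtering passes with one loop maintaining three counters (if/elif on severity) and builds the summary parts by a single comprehension over (count,label) pairs instead of three staged appends.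
import Mathlib
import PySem

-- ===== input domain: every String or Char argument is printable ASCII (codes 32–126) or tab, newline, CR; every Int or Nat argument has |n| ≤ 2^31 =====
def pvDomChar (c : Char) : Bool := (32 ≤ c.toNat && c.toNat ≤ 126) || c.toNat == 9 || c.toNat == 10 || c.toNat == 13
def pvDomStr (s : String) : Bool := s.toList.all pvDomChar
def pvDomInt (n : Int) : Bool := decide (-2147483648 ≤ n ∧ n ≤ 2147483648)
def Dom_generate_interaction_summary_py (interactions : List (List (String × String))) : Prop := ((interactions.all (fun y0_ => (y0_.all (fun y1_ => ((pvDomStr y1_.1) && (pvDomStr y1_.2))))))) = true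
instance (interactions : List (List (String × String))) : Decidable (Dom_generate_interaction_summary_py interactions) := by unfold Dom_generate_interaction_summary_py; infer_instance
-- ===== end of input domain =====

-- B replaces A's three filtering passes with ONE loop over the list maintaining three
-- counters (if/elif on the severity), and builds the summary parts by a single
-- filter+map over (count, label) pairs instead of three staged appends (alternative).

-- ===== PORT A =====
-- i["severity"] : total form, exact under Pre_ (the key is present)
def pvSeverity (i : List (String × String)) : String :=
  ((PySem.Dict.mk i).get? "severity").getD ""

def generate_interaction_summary_py (interactions : List (List (String × String))) : String :=
  if interactions = [] then "No significant drug interactions found."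
  else
    let major_count : Int :=
      (interactions.filter (fun i => pvSeverity i == "major" || pvSeverity i == "contraindicated")).length
    let moderate_count : Int := (interactions.filter (fun i => pvSeverity i == "moderate")).length
    let minor_count : Int := (interactions.filter (fun i => pvSeverity i == "minor")).length
    let summary_parts : List String :=
      (if major_count > 0 then [PySem.Int.toStr major_count ++ " major interaction(s)"] else []) ++
      (if moderate_count > 0 then [PySem.Int.toStr moderate_count ++ " moderate interaction(s)"] else []) ++
      (if minor_count > 0 then [PySem.Int.toStr minor_count ++ " minor interaction(s)"] else [])
    "Found " ++ PySem.Str.join ", " summary_parts ++ ". Review all interactions before prescribing."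

-- ===== PORT B =====
-- the loop body: bump one of the three counters according to the severity
def pvBump (acc : Int × Int × Int) (i : List (String × String)) : Int × Int × Int :=
  let s := pvSeverity i
  if s == "major" || s == "contraindicated" then (acc.1 + 1, acc.2.1, acc.2.2)
  else if s == "moderate" then (acc.1, acc.2.1 + 1, acc.2.2)
  else if s == "minor" then (acc.1, acc.2.1, acc.2.2 + 1)
  else acc

def generate_interaction_summary_py_alt (interactions : List (List (String × String))) : String :=
  if interactions = [] then "No significant drug interactions found."
  else
    let tallies := interactions.foldl pvBump (0, 0, 0)
    let parts :=
      (([(tallies.1, "major"), (tallies.2.1, "moderate"), (tallies.2.2, "minor")].filter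
          (fun p => decide (0 < p.1))).map
        (fun p => PySem.Int.toStr p.1 ++ " " ++ p.2 ++ " interaction(s)"))
    "Found " ++ PySem.Str.join ", " parts ++ ". Review all interactions before prescribing."

-- ===== PRECONDITION & SPEC =====
-- Pre_ excludes exactly the inputs where some interaction dict lacks the key
-- "severity": there A raises KeyError (as does B).
def Pre_generate_interaction_summary_py (interactions : List (List (String × String))) : Prop :=
  ∀ i ∈ interactions, ((PySem.Dict.mk i).get? "severity").isSome = true
instance (interactions : List (List (String × String))) : Decidable (Pre_generate_interaction_summary_py interactions) := by unfold Pre_generate_interaction_summary_py; infer_instance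

def pvWitness_generate_interaction_summary_py : (List (List (String × String))) :=
  [[("severity", "major")], [("severity", "minor")], [("severity", "minor")]]

def Spec_generate_interaction_summary_py (interactions : List (List (String × String))) (out : String) : Prop := out = generate_interaction_summary_py_alt interactions
instance (interactions : List (List (String × String))) (out : String) : Decidable (Spec_generate_interaction_summary_py interactions out) := by unfold Spec_generate_interaction_summary_py; infer_instance

-- ===== CLAIM (what is proved, stated in full; the proofs are below) =====
def Claim_equal_generate_interaction_summary_py : Prop := ∀ (interactions : List (List (String × String))), Dom_generate_interaction_summary_py interactions → Pre_generate_interaction_summary_py interactions → Spec_generate_interaction_summary_py interactions (generate_interaction_summary_py interactions)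

-- ===== LEMMAS AND PROOFS =====

-- B's fold computes the three (disjoint) counts A obtains by filtering
theorem pv_fold_counts (l : List (List (String × String))) (a b c : Int) :
    l.foldl pvBump (a, b, c) =
      (a + l.countP (fun i => pvSeverity i == "major" || pvSeverity i == "contraindicated"),
       b + l.countP (fun i => pvSeverity i == "moderate"),
       c + l.countP (fun i => pvSeverity i == "minor")) := by
  induction l generalizing a b c with
  | nil => simp
  | cons x t ih =>
    simp only [List.foldl_cons, List.countP_cons, pvBump]
    by_cases h1 : (pvSeverity x == "major" || pvSeverity x == "contraindicated") = true
    · have h2 : (pvSeverity x == "moderate") = false := by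
        rcases Bool.or_eq_true_iff.mp h1 with h | h <;> simp_all
      have h3 : (pvSeverity x == "minor") = false := by
        rcases Bool.or_eq_true_iff.mp h1 with h | h <;> simp_all
      simp [h1, h2, h3, ih]; omega
    · by_cases h2 : (pvSeverity x == "moderate") = true
      · have h3 : (pvSeverity x == "minor") = false := by simp_all
        simp [h1, h2, h3, ih]; omega
      · by_cases h3 : (pvSeverity x == "minor") = true
        · simp [h1, h2, h3, ih]; omega
        · simp [h1, h2, h3, ih]

-- the filter+map over (count,label) pairs equals A's three staged appends
theorem pv_parts (M Mo Mi : Int) :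
    (([(M, "major"), (Mo, "moderate"), (Mi, "minor")].filter (fun p => decide (0 < p.1))).map
        (fun p => PySem.Int.toStr p.1 ++ " " ++ p.2 ++ " interaction(s)"))
      = (if M > 0 then [PySem.Int.toStr M ++ " major interaction(s)"] else []) ++
        (if Mo > 0 then [PySem.Int.toStr Mo ++ " moderate interaction(s)"] else []) ++
        (if Mi > 0 then [PySem.Int.toStr Mi ++ " minor interaction(s)"] else []) := by
  by_cases h1 : 0 < M <;> by_cases h2 : 0 < Mo <;> by_cases h3 : 0 < Mi <;>
    simp [h1, h2, h3, String.append_assoc]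

theorem generate_interaction_summary_py_spec : Claim_equal_generate_interaction_summary_py := by
  intro interactions _ _
  show generate_interaction_summary_py interactions = generate_interaction_summary_py_alt interactions
  unfold generate_interaction_summary_py generate_interaction_summary_py_alt
  by_cases h : interactions = []
  · simp [h]
  · simp only [if_neg h, pv_fold_counts, zero_add]
    rw [pv_parts]
    simp [List.countP_eq_length_filter]
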